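-- pv_equiv track=rewrite | github.com/DmitryInd/UnstructuredTextAnonymization | src/mask/util.py | tokens_offsets_and_residuals_memorized
-- ===== SOURCE A (Python) =====
-- from typing import Tuple, List, Iterable, Dict
--
-- def tokens_offsets_and_residuals_memorized(x: str, x_tok: Tuple[str, ...]) -> Tuple[List[int], List[str]]:
--     """
--     Исследует, как текст был разбит на токены.
--     :param x: строка текста
--     :param x_tok: текстовые токены, на которые делится строка
--     :return: (список сдвигов на начало токенов;
--               список оставшихся перед/между/после токенами отрезков, которые не были разбиты на токены)
--     """
--     x_remaining_off = 0
--     x_remaining = x[:]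
--
--     offsets = []
--     residuals = []
--
--     for i, t in enumerate(x_tok):
--         try:
--             t_off_in_x_remaining = x_remaining.index(t)
--             t_res = x_remaining[:t_off_in_x_remaining]
--             t_off = x_remaining_off + t_off_in_x_remaining
--         except:
--             t_off_in_x_remaining = None
--             t_off = None
--             t_res = ''
--
--         offsets.append(t_off)
--         residuals.append(t_res)
--
--         if t_off is not None:
--             trim = t_off_in_x_remaining + len(t)
--             x_remaining_off += trim
--             x_remaining = x_remaining[trim:]
--
--     residuals.append(x_remaining)
--
--     return offsets, residuals
-- ===== SOURCE B (Python) =====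
-- def tokens_offsets_and_residuals_memorized(x, x_tok):
--     # pass 1: index all token occurrences with a moving cursor
--     positions = []
--     cur = 0
--     for t in x_tok:
--         p = x.find(t, cur)
--         if p == -1:
--             positions.append((None, t))
--         else:
--             positions.append((p, t))
--             cur = p + len(t)
--     # pass 2: slice the gaps out of the precomputed table
--     offsets = []
--     residuals = []
--     cur = 0
--     for p, t in positions:
--         offsets.append(p)
--         if p is None:
--             residuals.append('')
--         else:
--             residuals.append(x[cur:p])
--             cur = p + len(t)
--     residuals.append(x[cur:])
--     return offsets, residuals
-- ===== Notes on version B (the rewrite author's own statement) =====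
-- stated objective: alternative
-- what changed: B first builds a positions table of (start-or-None, token) pairs with str.find on the whole text and a moving cursor, then a separate second pass slices the gap residuals out of that table, instead of A's single interleaved loop that searches and slices a shrinking remaining-string copy.
import Mathlib
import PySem

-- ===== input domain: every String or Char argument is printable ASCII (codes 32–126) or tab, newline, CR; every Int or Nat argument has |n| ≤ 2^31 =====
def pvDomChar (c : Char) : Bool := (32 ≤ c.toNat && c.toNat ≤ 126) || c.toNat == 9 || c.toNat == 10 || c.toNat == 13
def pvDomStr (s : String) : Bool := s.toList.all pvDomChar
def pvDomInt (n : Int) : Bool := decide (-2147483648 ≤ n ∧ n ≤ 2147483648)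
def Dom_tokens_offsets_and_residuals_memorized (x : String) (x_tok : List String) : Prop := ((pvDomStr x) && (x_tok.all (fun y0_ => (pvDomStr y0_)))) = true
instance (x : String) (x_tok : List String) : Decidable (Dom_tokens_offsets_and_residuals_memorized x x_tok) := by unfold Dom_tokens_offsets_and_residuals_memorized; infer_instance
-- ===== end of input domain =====

-- B replaces A's interleaved search-and-slice loop over a shrinking remaining string by a
-- positions-table pass (str.find with a cursor over the whole text) followed by a separate
-- gap-slicing pass over that table; objective: alternative decomposition, same behaviour.

-- ===== PORT A =====
-- A's loop: state = (remaining string, remaining offset, accumulated offsets/residuals);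
-- `x_remaining.index(t)` with the bare except is ported via PySem.Str.find's -1 convention.
def pvA_loop (rem : String) (off : Int) (toks : List String)
    (offsets : List (Option Int)) (residuals : List String) : List (Option Int) × List String :=
  match toks with
  | [] => (offsets, residuals ++ [rem])
  | t :: rest =>
    let r := PySem.Str.find rem t
    if r = -1 then
      pvA_loop rem off rest (offsets ++ [none]) (residuals ++ [""])
    else
      let trim := r + (PySem.Str.len t : Int)
      pvA_loop (PySem.Str.slice rem (some trim) none) (off + trim) rest
        (offsets ++ [some (off + r)]) (residuals ++ [PySem.Str.slice rem none (some r)])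

def tokens_offsets_and_residuals_memorized (x : String) (x_tok : List String) : List (Option Int) × List String :=
  pvA_loop (PySem.Str.slice x none none) 0 x_tok [] []

-- ===== PORT B =====
-- pass 1 of Source B: positions table from x.find(t, cur)
def pvB_positions (x : String) (toks : List String) (cur : Int) : List (Option Int × String) :=
  match toks with
  | [] => []
  | t :: rest =>
    let p := PySem.Str.findFrom x t cur
    if p = -1 then (none, t) :: pvB_positions x rest cur
    else (some p, t) :: pvB_positions x rest (p + (PySem.Str.len t : Int))

-- pass 2 of Source B: slice the gaps of x out of the table
def pvB_gaps (x : String) (tbl : List (Option Int × String)) (cur : Int)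
    (offsets : List (Option Int)) (residuals : List String) : List (Option Int) × List String :=
  match tbl with
  | [] => (offsets, residuals ++ [PySem.Str.slice x (some cur) none])
  | (none, _) :: rest => pvB_gaps x rest cur (offsets ++ [none]) (residuals ++ [""])
  | (some p, t) :: rest =>
      pvB_gaps x rest (p + (PySem.Str.len t : Int)) (offsets ++ [some p])
        (residuals ++ [PySem.Str.slice x (some cur) (some p)])

def tokens_offsets_and_residuals_memorized_alt (x : String) (x_tok : List String) : List (Option Int) × List String :=
  pvB_gaps x (pvB_positions x x_tok 0) 0 [] []

-- ===== PRECONDITION & SPEC =====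
def Spec_tokens_offsets_and_residuals_memorized (x : String) (x_tok : List String) (out : List (Option Int) × List String) : Prop := out = tokens_offsets_and_residuals_memorized_alt x x_tok
instance (x : String) (x_tok : List String) (out : List (Option Int) × List String) : Decidable (Spec_tokens_offsets_and_residuals_memorized x x_tok out) := by unfold Spec_tokens_offsets_and_residuals_memorized; infer_instance

-- ===== CLAIM (what is proved, stated in full; the proofs are below) =====
def Claim_equal_tokens_offsets_and_residuals_memorized : Prop := ∀ (x : String) (x_tok : List String), Dom_tokens_offsets_and_residuals_memorized x x_tok → Spec_tokens_offsets_and_residuals_memorized x x_tok (tokens_offsets_and_residuals_memorized x x_tok)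

-- ===== LEMMAS AND PROOFS =====

lemma pvStr_ext {a b : String} (h : a.toList = b.toList) : a = b := by
  have := congrArg String.ofList h
  simpa using this

-- Invariant: A's loop with remaining string x[cur:] and offset cur computes exactly
-- B's gap pass over B's positions table started at cursor cur.
lemma pv_key (toks : List String) : ∀ (x rem : String) (cur : Nat)
    (offsets : List (Option Int)) (residuals : List String),
    rem.toList = x.toList.drop cur → cur ≤ x.toList.length →
    pvA_loop rem (cur : Int) toks offsets residuals
      = pvB_gaps x (pvB_positions x toks (cur : Int)) (cur : Int) offsets residuals := by
  induction toks with
  | nil =>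
    intro x rem cur offsets residuals hrem hcur
    simp only [pvA_loop, pvB_positions, pvB_gaps]
    congr 1
    refine congrArg (residuals ++ [·]) (pvStr_ext ?_)
    simp [PySem.Str.toList_slice, PySem.List.slice_from_natCast, hrem]
  | cons t rest ih =>
    intro x rem cur offsets residuals hrem hcur
    have hfind : PySem.Str.find rem t = PySem.Chars.find (x.toList.drop cur) t.toList := by
      simp [PySem.Str.find_eq, hrem]
    have hff : PySem.Str.findFrom x t (cur : Int) =
        (if PySem.Chars.find (x.toList.drop cur) t.toList = -1 then -1
         else (cur : Int) + PySem.Chars.find (x.toList.drop cur) t.toList) := by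
      simp only [PySem.Str.findFrom_eq]
      exact PySem.Chars.findFrom_natCast x.toList t.toList cur hcur
    by_cases hr : PySem.Chars.find (x.toList.drop cur) t.toList = -1
    · simp only [pvA_loop, pvB_positions, hfind, hff, hr, if_true]
      simp only [pvB_gaps]
      exact ih x rem cur _ _ hrem hcur
    · have hnn : 0 ≤ PySem.Chars.find (x.toList.drop cur) t.toList := by
        have := PySem.Chars.neg_one_le_find (x.toList.drop cur) t.toList
        omega
      set r := PySem.Chars.find (x.toList.drop cur) t.toList with hrdef
      have hspec := PySem.Chars.find_spec (s := x.toList.drop cur) (sub := t.toList) hnn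
      have hlenle : r.toNat + t.toList.length ≤ x.toList.length - cur := by
        have h1 := hspec.1.length_le
        rw [List.length_drop, List.length_drop] at h1
        have h2 := PySem.Chars.find_le_length (x.toList.drop cur) t.toList
        rw [List.length_drop] at h2
        omega
      have hp_ne : (cur : Int) + r ≠ -1 := by omega
      simp only [pvA_loop, pvB_positions, hfind, hff, if_neg hr, if_neg hp_ne]
      simp only [pvB_gaps]
      have hlen : (PySem.Str.len t : Int) = (t.toList.length : Int) := by
        simp [PySem.Str.len]
      have hcur' : ((cur + r.toNat + t.toList.length : Nat) : Int)
          = (cur : Int) + (r + (PySem.Str.len t : Int)) := by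
        push_cast [hlen]; omega
      have hres : PySem.Str.slice rem none (some r)
          = PySem.Str.slice x (some (cur : Int)) (some ((cur : Int) + r)) := by
        refine pvStr_ext ?_
        simp only [PySem.Str.toList_slice, PySem.Chars.slice_eq_listSlice, hrem]
        have e1 : PySem.List.slice (x.toList.drop cur) none (some r)
            = (x.toList.drop cur).take r.toNat := PySem.List.slice_to _ hnn
        have e2 : PySem.List.slice x.toList (some (cur : Int)) (some ((cur : Int) + r))
            = (x.toList.drop ((cur : Int)).toNat).take (((cur : Int) + r).toNat - ((cur : Int)).toNat) :=
          PySem.List.slice_toNat _ (by omega) (by omega)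
        rw [e1, e2]
        simp only [Int.toNat_natCast]
        congr 1
        omega
      rw [hres]
      have hrem' : (PySem.Str.slice rem (some (r + (PySem.Str.len t : Int))) none).toList
          = x.toList.drop (cur + r.toNat + t.toList.length) := by
        simp only [PySem.Str.toList_slice, PySem.Chars.slice_eq_listSlice, hrem]
        have e3 : PySem.List.slice (x.toList.drop cur) (some (r + (PySem.Str.len t : Int))) none
            = (x.toList.drop cur).drop (r + (PySem.Str.len t : Int)).toNat :=
          PySem.List.slice_from _ (by rw [hlen]; omega)
        rw [e3, List.drop_drop]
        congr 1
        rw [hlen]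
        omega
      have hbound : cur + r.toNat + t.toList.length ≤ x.toList.length := by omega
      have := ih x (PySem.Str.slice rem (some (r + (PySem.Str.len t : Int))) none)
        (cur + r.toNat + t.toList.length) (offsets ++ [some ((cur : Int) + r)])
        (residuals ++ [PySem.Str.slice x (some (cur : Int)) (some ((cur : Int) + r))])
        hrem' hbound
      rw [hcur'] at this
      have hassoc : (cur : Int) + r + (PySem.Str.len t : Int)
          = (cur : Int) + (r + (PySem.Str.len t : Int)) := by ring
      rw [hassoc]
      exact this

-- ===== VERDICT (by name: the statement is the Claim_ definition above) =====
theorem tokens_offsets_and_residuals_memorized_spec : Claim_equal_tokens_offsets_and_residuals_memorized := by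
  intro x x_tok _
  unfold Spec_tokens_offsets_and_residuals_memorized
  unfold tokens_offsets_and_residuals_memorized tokens_offsets_and_residuals_memorized_alt
  have h0 : (PySem.Str.slice x none none).toList = x.toList.drop 0 := by
    simp [PySem.Str.toList_slice]
  simpa using pv_key x_tok x (PySem.Str.slice x none none) 0 [] [] h0 (Nat.zero_le _)
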